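-- pv_equiv track=rewrite | github.com/vishnu1136/finalagents | apps/api/api/agents/nodes/source_linking_node.py | categorize_document
-- ===== SOURCE A (Python) =====
-- def categorize_document(title: str, snippet: str = "") -> str:
--     """Categorize a document based on its title and content"""
--     title_lower = title.lower()
--     snippet_lower = snippet.lower()
--     content = f"{title_lower} {snippet_lower}"
--
--     # Define category patterns
--     categories = {
--         "Implementation Guides": [
--             "implementation", "setup", "install", "configuration", "deployment",
--             "getting started", "quick start", "tutorial", "guide", "how to"
--         ],
--         "Best Practices": [
--             "best practice", "recommendation", "guideline", "standard",
--             "policy", "procedure", "methodology", "approach"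
--         ],
--         "Evaluation & Metrics": [
--             "evaluation", "assessment", "metrics", "measurement", "kpi",
--             "performance", "effectiveness", "analysis", "testing"
--         ],
--         "Use Cases": [
--             "use case", "scenario", "example", "case study", "application",
--             "workflow", "process", "business case"
--         ],
--         "Technical Documentation": [
--             "api", "technical", "specification", "architecture", "design",
--             "system", "integration", "development", "code"
--         ],
--         "Research & Studies": [
--             "research", "study", "paper", "analysis", "findings",
--             "survey", "report", "investigation", "experiment"
--         ],
--         "Training & Education": [
--             "training", "education", "learning", "course", "workshop",
--             "certification", "tutorial", "lesson", "module"
--         ],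
--         "Policies & Compliance": [
--             "policy", "compliance", "regulation", "standard", "requirement",
--             "governance", "audit", "security", "privacy"
--         ]
--     }
--
--     # Score each category based on keyword matches
--     category_scores = {}
--     for category, keywords in categories.items():
--         score = 0
--         for keyword in keywords:
--             if keyword in content:
--                 score += content.count(keyword)
--         category_scores[category] = score
--
--     # Return the category with the highest score, or "General" if no clear match
--     if category_scores and max(category_scores.values()) > 0:
--         return max(category_scores, key=category_scores.get)
--     else:
--         return "General Documents"
-- ===== SOURCE B (Python) =====
-- def categorize_document(title: str, snippet: str = "") -> str:
--     """Categorize a document based on its title and content (inverted-index formulation)."""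
--     content = f"{title.lower()} {snippet.lower()}"
--
--     categories = {
--         "Implementation Guides": [
--             "implementation", "setup", "install", "configuration", "deployment",
--             "getting started", "quick start", "tutorial", "guide", "how to"
--         ],
--         "Best Practices": [
--             "best practice", "recommendation", "guideline", "standard",
--             "policy", "procedure", "methodology", "approach"
--         ],
--         "Evaluation & Metrics": [
--             "evaluation", "assessment", "metrics", "measurement", "kpi",
--             "performance", "effectiveness", "analysis", "testing"
--         ],
--         "Use Cases": [
--             "use case", "scenario", "example", "case study", "application",
--             "workflow", "process", "business case"
--         ],
--         "Technical Documentation": [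
--             "api", "technical", "specification", "architecture", "design",
--             "system", "integration", "development", "code"
--         ],
--         "Research & Studies": [
--             "research", "study", "paper", "analysis", "findings",
--             "survey", "report", "investigation", "experiment"
--         ],
--         "Training & Education": [
--             "training", "education", "learning", "course", "workshop",
--             "certification", "tutorial", "lesson", "module"
--         ],
--         "Policies & Compliance": [
--             "policy", "compliance", "regulation", "standard", "requirement",
--             "governance", "audit", "security", "privacy"
--         ]
--     }
--
--     # Inverted index: each unique keyword -> the categories that own it.
--     index = {}
--     for category, keywords in categories.items():
--         for keyword in keywords:
--             index.setdefault(keyword, []).append(category)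
--
--     # One counting pass per unique keyword (shared keywords are counted once).
--     scores = {category: 0 for category in categories}
--     for keyword, owners in index.items():
--         c = content.count(keyword)
--         for category in owners:
--             scores[category] += c
--
--     best = max(scores, key=scores.get)
--     return best if scores[best] > 0 else "General Documents"
-- ===== Notes on version B (the rewrite author's own statement) =====
-- stated objective: alternative
-- what changed: B transposes A's category-by-category keyword rescan into an inverted index (unique keyword -> owning categories) built once, counts each unique keyword in the content exactly once, and adds that count to every owning category's pre-initialised score, then checks the argmax's score instead of max(values); shared keywords (tutorial, analysis, policy, standard) are counted once instead of once per category.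
import Mathlib
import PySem

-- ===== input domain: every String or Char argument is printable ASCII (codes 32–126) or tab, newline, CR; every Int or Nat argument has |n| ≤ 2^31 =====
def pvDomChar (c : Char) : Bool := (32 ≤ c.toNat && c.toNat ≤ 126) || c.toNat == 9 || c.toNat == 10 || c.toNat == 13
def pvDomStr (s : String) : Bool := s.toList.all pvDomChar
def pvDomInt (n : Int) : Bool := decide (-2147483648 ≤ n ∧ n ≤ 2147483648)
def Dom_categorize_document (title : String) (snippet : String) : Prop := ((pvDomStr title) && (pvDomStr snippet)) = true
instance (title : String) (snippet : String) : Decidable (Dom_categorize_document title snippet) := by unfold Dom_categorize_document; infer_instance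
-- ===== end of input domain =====

-- B replaces A's per-category keyword rescan by an inverted index (keyword -> owning categories) and one
-- counting pass over the unique keywords (alternative decomposition; same exact result).


-- ===== PORT A =====
-- the literal `categories` dict both Pythons write out
def pvCategories : List (String × List String) := [
  ("Implementation Guides", ["implementation", "setup", "install", "configuration", "deployment",
      "getting started", "quick start", "tutorial", "guide", "how to"]),
  ("Best Practices", ["best practice", "recommendation", "guideline", "standard",
      "policy", "procedure", "methodology", "approach"]),
  ("Evaluation & Metrics", ["evaluation", "assessment", "metrics", "measurement", "kpi",
      "performance", "effectiveness", "analysis", "testing"]),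
  ("Use Cases", ["use case", "scenario", "example", "case study", "application",
      "workflow", "process", "business case"]),
  ("Technical Documentation", ["api", "technical", "specification", "architecture", "design",
      "system", "integration", "development", "code"]),
  ("Research & Studies", ["research", "study", "paper", "analysis", "findings",
      "survey", "report", "investigation", "experiment"]),
  ("Training & Education", ["training", "education", "learning", "course", "workshop",
      "certification", "tutorial", "lesson", "module"]),
  ("Policies & Compliance", ["policy", "compliance", "regulation", "standard", "requirement",
      "governance", "audit", "security", "privacy"])]

-- A's scoring loop: for each category, sum content.count(keyword) over its keywords (guarded by `keyword in content`)
def pvScoresA (content : List Char) : PySem.Dict String Int :=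
  (PySem.Dict.ofList pvCategories).items.foldl
    (fun d ck =>
      d.insert ck.1 (ck.2.foldl
        (fun score keyword =>
          if PySem.Chars.isIn keyword.toList content then
            score + (PySem.Chars.count content keyword.toList : Int)
          else score) 0))
    PySem.Dict.empty

-- A's tail: `if category_scores and max(values) > 0: return max(category_scores, key=category_scores.get)`
-- (max with key compares the stored scores; every key is present, so `.get` is `.getD _ 0` here; the
--  `none` arms are Python's falsy-empty-dict branch resp. unreachable)
def pvRunA (content : List Char) : String :=
  let category_scores := pvScoresA content
  match PySem.List.max? category_scores.values (fun v => v) with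
  | none => "General Documents"
  | some m =>
    if m > 0 then
      match PySem.List.max? category_scores.keys (fun k => category_scores.getD k 0) with
      | some k => k
      | none => "General Documents"
    else "General Documents"

-- f-string `f"{title.lower()} {snippet.lower()}"` ported exactly on the char-list side
def categorize_document (title : String) (snippet : String) : String :=
  pvRunA (PySem.Chars.lower title.toList ++ ' ' :: PySem.Chars.lower snippet.toList)

-- ===== PORT B =====
-- B's inverted index: keyword -> list of owning categories (setdefault(kw, []).append(cat))
def pvIndexB : PySem.Dict String (List String) :=
  (PySem.Dict.ofList pvCategories).items.foldl
    (fun idx ck => ck.2.foldl (fun idx keyword => idx.insert keyword (idx.getD keyword [] ++ [ck.1])) idx)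
    PySem.Dict.empty

-- B's scoring: scores pre-initialised to 0, then one count per unique keyword, added to each owner
def pvScoresB (content : List Char) : PySem.Dict String Int :=
  pvIndexB.items.foldl
    (fun d kc =>
      let c : Int := PySem.Chars.count content kc.1.toList
      kc.2.foldl (fun d category => d.insert category (d.getD category 0 + c)) d)
    ((PySem.Dict.ofList pvCategories).items.foldl (fun d ck => d.insert ck.1 (0 : Int)) PySem.Dict.empty)

-- B's tail: `best = max(scores, key=scores.get); return best if scores[best] > 0 else "General Documents"`
def pvRunB (content : List Char) : String :=
  let scores := pvScoresB content
  match PySem.List.max? scores.keys (fun k => scores.getD k 0) with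
  | some best => if scores.getD best 0 > 0 then best else "General Documents"
  | none => "General Documents"

def categorize_document_alt (title : String) (snippet : String) : String :=
  pvRunB (PySem.Chars.lower title.toList ++ ' ' :: PySem.Chars.lower snippet.toList)

-- ===== PRECONDITION & SPEC =====
def Spec_categorize_document (title : String) (snippet : String) (out : String) : Prop := out = categorize_document_alt title snippet
instance (title : String) (snippet : String) (out : String) : Decidable (Spec_categorize_document title snippet out) := by unfold Spec_categorize_document; infer_instance

-- ===== CLAIM (what is proved, stated in full; the proofs are below) =====
def Claim_equal_categorize_document : Prop := ∀ (title : String) (snippet : String), Dom_categorize_document title snippet → Spec_categorize_document title snippet (categorize_document title snippet)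

-- ===== LEMMAS AND PROOFS =====

-- count.go returns its accumulator when the needle occurs nowhere in the haystack
lemma pv_go_eq_acc (kw : List Char) (fuel : Nat) :
    ∀ (l : List Char) (acc : Nat), ¬ kw <:+: l → PySem.Chars.count.go kw fuel l acc = acc := by
  induction fuel with
  | zero => intro l acc _; rw [PySem.Chars.count.go.eq_def]
  | succ n ih =>
    intro l acc h
    cases l with
    | nil => rw [PySem.Chars.count.go.eq_def]
    | cons hd t =>
      rw [PySem.Chars.count.go.eq_def]
      by_cases hp : kw.isPrefixOf (hd :: t) = true
      · exact absurd (List.isPrefixOf_iff_prefix.mp hp).isInfix h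
      · simp only [Bool.not_eq_true] at hp
        simp only [hp, Bool.false_eq_true, if_false]
        exact ih t acc (fun hi => h (List.infix_cons hi))

lemma pv_count_eq_zero (c kw : List Char) (h : PySem.Chars.isIn kw c = false) :
    PySem.Chars.count c kw = 0 := by
  have hinf : ¬ kw <:+: c := (PySem.Chars.isIn_eq_false_iff kw c).mp h
  have hkw : kw.isEmpty = false := by
    cases kw with
    | nil => rw [PySem.Chars.isIn_nil] at h; exact absurd h (by simp)
    | cons a t => rfl
  simp only [PySem.Chars.count, hkw, Bool.false_eq_true, if_false]
  exact pv_go_eq_acc kw c.length c 0 hinf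

-- A's guarded accumulation step collapses: the count is 0 whenever the guard is false
@[simp] lemma pv_collapse (content kw : List Char) (s : Int) :
    (if PySem.Chars.isIn kw content = true then s + (PySem.Chars.count content kw : Int) else s)
      = s + (PySem.Chars.count content kw : Int) := by
  cases h : PySem.Chars.isIn kw content with
  | true => simp
  | false => simp [pv_count_eq_zero content kw h]

-- the two scoring passes build the same dict: both sides' items, written out
lemma pv_itemsA (c : List Char) : (pvScoresA c).items = [
  ("Implementation Guides", (PySem.Chars.count c "implementation".toList : Int) + (PySem.Chars.count c "setup".toList : Int) + (PySem.Chars.count c "install".toList : Int) + (PySem.Chars.count c "configuration".toList : Int) + (PySem.Chars.count c "deployment".toList : Int) + (PySem.Chars.count c "getting started".toList : Int) + (PySem.Chars.count c "quick start".toList : Int) + (PySem.Chars.count c "tutorial".toList : Int) + (PySem.Chars.count c "guide".toList : Int) + (PySem.Chars.count c "how to".toList : Int)),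
  ("Best Practices", (PySem.Chars.count c "best practice".toList : Int) + (PySem.Chars.count c "recommendation".toList : Int) + (PySem.Chars.count c "guideline".toList : Int) + (PySem.Chars.count c "standard".toList : Int) + (PySem.Chars.count c "policy".toList : Int) + (PySem.Chars.count c "procedure".toList : Int) + (PySem.Chars.count c "methodology".toList : Int) + (PySem.Chars.count c "approach".toList : Int)),
  ("Evaluation & Metrics", (PySem.Chars.count c "evaluation".toList : Int) + (PySem.Chars.count c "assessment".toList : Int) + (PySem.Chars.count c "metrics".toList : Int) + (PySem.Chars.count c "measurement".toList : Int) + (PySem.Chars.count c "kpi".toList : Int) + (PySem.Chars.count c "performance".toList : Int) + (PySem.Chars.count c "effectiveness".toList : Int) + (PySem.Chars.count c "analysis".toList : Int) + (PySem.Chars.count c "testing".toList : Int)),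
  ("Use Cases", (PySem.Chars.count c "use case".toList : Int) + (PySem.Chars.count c "scenario".toList : Int) + (PySem.Chars.count c "example".toList : Int) + (PySem.Chars.count c "case study".toList : Int) + (PySem.Chars.count c "application".toList : Int) + (PySem.Chars.count c "workflow".toList : Int) + (PySem.Chars.count c "process".toList : Int) + (PySem.Chars.count c "business case".toList : Int)),
  ("Technical Documentation", (PySem.Chars.count c "api".toList : Int) + (PySem.Chars.count c "technical".toList : Int) + (PySem.Chars.count c "specification".toList : Int) + (PySem.Chars.count c "architecture".toList : Int) + (PySem.Chars.count c "design".toList : Int) + (PySem.Chars.count c "system".toList : Int) + (PySem.Chars.count c "integration".toList : Int) + (PySem.Chars.count c "development".toList : Int) + (PySem.Chars.count c "code".toList : Int)),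
  ("Research & Studies", (PySem.Chars.count c "research".toList : Int) + (PySem.Chars.count c "study".toList : Int) + (PySem.Chars.count c "paper".toList : Int) + (PySem.Chars.count c "analysis".toList : Int) + (PySem.Chars.count c "findings".toList : Int) + (PySem.Chars.count c "survey".toList : Int) + (PySem.Chars.count c "report".toList : Int) + (PySem.Chars.count c "investigation".toList : Int) + (PySem.Chars.count c "experiment".toList : Int)),
  ("Training & Education", (PySem.Chars.count c "training".toList : Int) + (PySem.Chars.count c "education".toList : Int) + (PySem.Chars.count c "learning".toList : Int) + (PySem.Chars.count c "course".toList : Int) + (PySem.Chars.count c "workshop".toList : Int) + (PySem.Chars.count c "certification".toList : Int) + (PySem.Chars.count c "tutorial".toList : Int) + (PySem.Chars.count c "lesson".toList : Int) + (PySem.Chars.count c "module".toList : Int)),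
  ("Policies & Compliance", (PySem.Chars.count c "policy".toList : Int) + (PySem.Chars.count c "compliance".toList : Int) + (PySem.Chars.count c "regulation".toList : Int) + (PySem.Chars.count c "standard".toList : Int) + (PySem.Chars.count c "requirement".toList : Int) + (PySem.Chars.count c "governance".toList : Int) + (PySem.Chars.count c "audit".toList : Int) + (PySem.Chars.count c "security".toList : Int) + (PySem.Chars.count c "privacy".toList : Int))] := by
  simp [pvScoresA, pvCategories, PySem.Dict.ofList, PySem.Dict.update, PySem.Dict.insert,
    PySem.Dict.contains, PySem.Dict.empty]

set_option maxRecDepth 65536 in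
set_option maxHeartbeats 1600000 in
lemma pv_indexB_items : pvIndexB.items = [
  ("implementation", ["Implementation Guides"]),
  ("setup", ["Implementation Guides"]),
  ("install", ["Implementation Guides"]),
  ("configuration", ["Implementation Guides"]),
  ("deployment", ["Implementation Guides"]),
  ("getting started", ["Implementation Guides"]),
  ("quick start", ["Implementation Guides"]),
  ("tutorial", ["Implementation Guides", "Training & Education"]),
  ("guide", ["Implementation Guides"]),
  ("how to", ["Implementation Guides"]),
  ("best practice", ["Best Practices"]),
  ("recommendation", ["Best Practices"]),
  ("guideline", ["Best Practices"]),
  ("standard", ["Best Practices", "Policies & Compliance"]),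
  ("policy", ["Best Practices", "Policies & Compliance"]),
  ("procedure", ["Best Practices"]),
  ("methodology", ["Best Practices"]),
  ("approach", ["Best Practices"]),
  ("evaluation", ["Evaluation & Metrics"]),
  ("assessment", ["Evaluation & Metrics"]),
  ("metrics", ["Evaluation & Metrics"]),
  ("measurement", ["Evaluation & Metrics"]),
  ("kpi", ["Evaluation & Metrics"]),
  ("performance", ["Evaluation & Metrics"]),
  ("effectiveness", ["Evaluation & Metrics"]),
  ("analysis", ["Evaluation & Metrics", "Research & Studies"]),
  ("testing", ["Evaluation & Metrics"]),
  ("use case", ["Use Cases"]),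
  ("scenario", ["Use Cases"]),
  ("example", ["Use Cases"]),
  ("case study", ["Use Cases"]),
  ("application", ["Use Cases"]),
  ("workflow", ["Use Cases"]),
  ("process", ["Use Cases"]),
  ("business case", ["Use Cases"]),
  ("api", ["Technical Documentation"]),
  ("technical", ["Technical Documentation"]),
  ("specification", ["Technical Documentation"]),
  ("architecture", ["Technical Documentation"]),
  ("design", ["Technical Documentation"]),
  ("system", ["Technical Documentation"]),
  ("integration", ["Technical Documentation"]),
  ("development", ["Technical Documentation"]),
  ("code", ["Technical Documentation"]),
  ("research", ["Research & Studies"]),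
  ("study", ["Research & Studies"]),
  ("paper", ["Research & Studies"]),
  ("findings", ["Research & Studies"]),
  ("survey", ["Research & Studies"]),
  ("report", ["Research & Studies"]),
  ("investigation", ["Research & Studies"]),
  ("experiment", ["Research & Studies"]),
  ("training", ["Training & Education"]),
  ("education", ["Training & Education"]),
  ("learning", ["Training & Education"]),
  ("course", ["Training & Education"]),
  ("workshop", ["Training & Education"]),
  ("certification", ["Training & Education"]),
  ("lesson", ["Training & Education"]),
  ("module", ["Training & Education"]),
  ("compliance", ["Policies & Compliance"]),
  ("regulation", ["Policies & Compliance"]),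
  ("requirement", ["Policies & Compliance"]),
  ("governance", ["Policies & Compliance"]),
  ("audit", ["Policies & Compliance"]),
  ("security", ["Policies & Compliance"]),
  ("privacy", ["Policies & Compliance"])] := by decide

set_option maxHeartbeats 1000000 in
lemma pv_itemsB (c : List Char) : (pvScoresB c).items = [
  ("Implementation Guides", 0 + (PySem.Chars.count c "implementation".toList : Int) + (PySem.Chars.count c "setup".toList : Int) + (PySem.Chars.count c "install".toList : Int) + (PySem.Chars.count c "configuration".toList : Int) + (PySem.Chars.count c "deployment".toList : Int) + (PySem.Chars.count c "getting started".toList : Int) + (PySem.Chars.count c "quick start".toList : Int) + (PySem.Chars.count c "tutorial".toList : Int) + (PySem.Chars.count c "guide".toList : Int) + (PySem.Chars.count c "how to".toList : Int)),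
  ("Best Practices", 0 + (PySem.Chars.count c "best practice".toList : Int) + (PySem.Chars.count c "recommendation".toList : Int) + (PySem.Chars.count c "guideline".toList : Int) + (PySem.Chars.count c "standard".toList : Int) + (PySem.Chars.count c "policy".toList : Int) + (PySem.Chars.count c "procedure".toList : Int) + (PySem.Chars.count c "methodology".toList : Int) + (PySem.Chars.count c "approach".toList : Int)),
  ("Evaluation & Metrics", 0 + (PySem.Chars.count c "evaluation".toList : Int) + (PySem.Chars.count c "assessment".toList : Int) + (PySem.Chars.count c "metrics".toList : Int) + (PySem.Chars.count c "measurement".toList : Int) + (PySem.Chars.count c "kpi".toList : Int) + (PySem.Chars.count c "performance".toList : Int) + (PySem.Chars.count c "effectiveness".toList : Int) + (PySem.Chars.count c "analysis".toList : Int) + (PySem.Chars.count c "testing".toList : Int)),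
  ("Use Cases", 0 + (PySem.Chars.count c "use case".toList : Int) + (PySem.Chars.count c "scenario".toList : Int) + (PySem.Chars.count c "example".toList : Int) + (PySem.Chars.count c "case study".toList : Int) + (PySem.Chars.count c "application".toList : Int) + (PySem.Chars.count c "workflow".toList : Int) + (PySem.Chars.count c "process".toList : Int) + (PySem.Chars.count c "business case".toList : Int)),
  ("Technical Documentation", 0 + (PySem.Chars.count c "api".toList : Int) + (PySem.Chars.count c "technical".toList : Int) + (PySem.Chars.count c "specification".toList : Int) + (PySem.Chars.count c "architecture".toList : Int) + (PySem.Chars.count c "design".toList : Int) + (PySem.Chars.count c "system".toList : Int) + (PySem.Chars.count c "integration".toList : Int) + (PySem.Chars.count c "development".toList : Int) + (PySem.Chars.count c "code".toList : Int)),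
  ("Research & Studies", 0 + (PySem.Chars.count c "analysis".toList : Int) + (PySem.Chars.count c "research".toList : Int) + (PySem.Chars.count c "study".toList : Int) + (PySem.Chars.count c "paper".toList : Int) + (PySem.Chars.count c "findings".toList : Int) + (PySem.Chars.count c "survey".toList : Int) + (PySem.Chars.count c "report".toList : Int) + (PySem.Chars.count c "investigation".toList : Int) + (PySem.Chars.count c "experiment".toList : Int)),
  ("Training & Education", 0 + (PySem.Chars.count c "tutorial".toList : Int) + (PySem.Chars.count c "training".toList : Int) + (PySem.Chars.count c "education".toList : Int) + (PySem.Chars.count c "learning".toList : Int) + (PySem.Chars.count c "course".toList : Int) + (PySem.Chars.count c "workshop".toList : Int) + (PySem.Chars.count c "certification".toList : Int) + (PySem.Chars.count c "lesson".toList : Int) + (PySem.Chars.count c "module".toList : Int)),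
  ("Policies & Compliance", 0 + (PySem.Chars.count c "standard".toList : Int) + (PySem.Chars.count c "policy".toList : Int) + (PySem.Chars.count c "compliance".toList : Int) + (PySem.Chars.count c "regulation".toList : Int) + (PySem.Chars.count c "requirement".toList : Int) + (PySem.Chars.count c "governance".toList : Int) + (PySem.Chars.count c "audit".toList : Int) + (PySem.Chars.count c "security".toList : Int) + (PySem.Chars.count c "privacy".toList : Int))] := by
  unfold pvScoresB
  rw [pv_indexB_items]
  simp [pvCategories, PySem.Dict.ofList, PySem.Dict.update, PySem.Dict.insert,
    PySem.Dict.contains, PySem.Dict.empty, PySem.Dict.getD, PySem.Dict.get?]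

lemma pv_scores_eq (c : List Char) : pvScoresA c = pvScoresB c := by
  apply PySem.Dict.ext
  rw [pv_itemsA, pv_itemsB]
  simp only [List.cons.injEq, Prod.mk.injEq, and_true, true_and]
  refine ⟨?_, ?_, ?_, ?_, ?_, ?_, ?_, ?_⟩ <;> first | rfl | omega

-- the running max of the mapped values equals the value at Python's argmax
lemma pv_foldl_map_max {α : Type} (f : α → Int) (x : α) (t : List α) (kb : α)
    (h : PySem.List.max? (x :: t) f = some kb) :
    (t.map f).foldl max (f x) = f kb := by
  have hub := PySem.List.max?_isMax h
  have hmem := PySem.List.max?_mem h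
  apply le_antisymm
  · rcases PySem.List.foldl_max_mem (t.map f) (f x) with he | he
    · rw [he]; exact hub x List.mem_cons_self
    · rcases List.mem_map.mp he with ⟨y, hy, hey⟩
      rw [← hey]; exact hub y (List.mem_cons_of_mem _ hy)
  · rcases List.mem_cons.mp hmem with he | he
    · rw [he]; exact (PySem.List.le_foldl_max (t.map f) (f x)).1
    · exact (PySem.List.le_foldl_max (t.map f) (f x)).2 (f kb) (List.mem_map.mpr ⟨kb, he, rfl⟩)

-- "max(values) > 0, then argmax" chooses the same string as "argmax, then its value > 0"
lemma pv_final (d : PySem.Dict String Int)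
    (hne : d.keys ≠ [])
    (hv : d.values = d.keys.map (fun k => d.getD k 0)) :
    (match PySem.List.max? d.values (fun v => v) with
     | none => "General Documents"
     | some m =>
       if m > 0 then
         match PySem.List.max? d.keys (fun k => d.getD k 0) with
         | some k => k
         | none => "General Documents"
       else "General Documents")
    = match PySem.List.max? d.keys (fun k => d.getD k 0) with
      | some best => if d.getD best 0 > 0 then best else "General Documents"
      | none => "General Documents" := by
  cases hk : d.keys with
  | nil => exact absurd hk hne
  | cons k0 kt =>
    cases hm : PySem.List.max? d.keys (fun k => d.getD k 0) with
    | none => exact absurd ((PySem.List.max?_eq_none_iff _ _).mp hm) hne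
    | some kb =>
      rw [hk] at hm
      have hfold : (kt.map (fun k => d.getD k 0)).foldl max (d.getD k0 0) = d.getD kb 0 :=
        pv_foldl_map_max (fun k => d.getD k 0) k0 kt kb hm
      rw [hv, hk, List.map_cons, PySem.List.max?_id_cons, hfold, hm]

lemma pv_keys_ne_nil (c : List Char) : (pvScoresA c).keys ≠ [] := by
  simp [PySem.Dict.keys, pv_itemsA]

lemma pv_values_eq_map (c : List Char) :
    (pvScoresA c).values = (pvScoresA c).keys.map (fun k => (pvScoresA c).getD k 0) := by
  simp [PySem.Dict.values, PySem.Dict.keys, PySem.Dict.getD, PySem.Dict.get?, pv_itemsA]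

lemma pv_run_eq (c : List Char) : pvRunA c = pvRunB c := by
  unfold pvRunA pvRunB
  rw [← pv_scores_eq c]
  exact pv_final (pvScoresA c) (pv_keys_ne_nil c) (pv_values_eq_map c)

-- ===== VERDICT (by name: the statement is the Claim_ definition above) =====
theorem categorize_document_spec : Claim_equal_categorize_document := by
  intro title snippet _
  unfold Spec_categorize_document categorize_document categorize_document_alt
  exact pv_run_eq _
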